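-- pv_equiv track=rewrite | github.com/RamiBenchouia1/AdventOfCode2020 | day4/part1.py | listOfEntries
-- ===== SOURCE A (Python) =====
-- def listOfEntries(someList):
--     entryList = []
--     entryString = ""
--     for item in someList:
--         subList = []
--         if item != "": #append each string to temp/holder variable "entryString" which accumulates contents of each entry
--             entryString += item + " "
--         else: #if empty string is encountered, this implies that we have finished with one entry and new list needs to be created
--             modString = entryString[:-1] #removes space character that is inadvertantly added when last item is appended
--             subList.append(modString) #create a list of a single string that contains text from all lines of txt file corresponding to 1 entry
--             entryList.append(subList) #list of lists, where each sublist contains 1 string with all lines from original txt file corresponding to 1 entry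
--             entryString = "" #reset the variable entry string for next entry
--
--     return entryList
-- ===== SOURCE B (Python) =====
-- def listOfEntries(someList):
--     if "" not in someList:
--         return []
--     b = someList.index("")
--     return [[" ".join(someList[:b])]] + listOfEntries(someList[b+1:])
-- ===== Notes on version B (the rewrite author's own statement) =====
-- stated objective: alternative
-- what changed: Replaces the accumulator fold (growing an entryString line by line and flushing it at each blank) by a recursive split on the first blank line: take the prefix, ' '.join it in one call, and recurse on the rest, which drops the trailing unterminated group naturally.
import Mathlib
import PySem

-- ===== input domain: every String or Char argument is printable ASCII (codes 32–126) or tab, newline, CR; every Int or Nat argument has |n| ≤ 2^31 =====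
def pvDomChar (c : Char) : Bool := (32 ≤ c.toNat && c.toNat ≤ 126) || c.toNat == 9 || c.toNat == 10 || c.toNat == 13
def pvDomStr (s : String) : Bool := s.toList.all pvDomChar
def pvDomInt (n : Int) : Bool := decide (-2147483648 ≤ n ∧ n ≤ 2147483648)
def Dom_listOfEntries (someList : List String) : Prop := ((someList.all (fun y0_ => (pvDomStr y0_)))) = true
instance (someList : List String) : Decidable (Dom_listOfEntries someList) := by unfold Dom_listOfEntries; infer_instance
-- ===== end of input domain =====

-- B replaces A's line-by-line accumulator fold with a recursive split on the first blank line
-- joined in one pass ('alternative' objective); return values agree on every input.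

-- ===== PORT A =====
-- loop body of A's for-loop: accumulate non-empty lines into entryString, flush [entryString[:-1]] at a blank
def stepA (st : List (List String) × String) (item : String) : List (List String) × String :=
  if item ≠ "" then
    (st.1, st.2 ++ item ++ " ")
  else
    let modString := PySem.Str.slice st.2 none (some (-1))   -- entryString[:-1]
    (st.1 ++ [[modString]], "")

def listOfEntries (someList : List String) : List (List String) :=
  (someList.foldl stepA ([], "")).1

-- ===== PORT B =====
def listOfEntries_alt (someList : List String) : List (List String) :=
  match h : PySem.List.index? someList "" with        -- '"" not in someList' / someList.index("")
  | none => []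
  | some b =>
      [PySem.Str.join " " (PySem.List.slice someList none (some (b : Int)))] ::
        listOfEntries_alt (PySem.List.slice someList (some ((b : Int) + 1)) none)
termination_by someList.length
decreasing_by
  have hmem : "" ∈ someList := (PySem.List.index?_isSome_iff _ _).mp (by rw [h]; rfl)
  have hpos : 0 < someList.length := List.length_pos_of_mem hmem
  have h1 : (0 : Int) ≤ (b : Int) + 1 := by positivity
  rw [PySem.List.slice_from _ h1]
  have h2 : ((b : Int) + 1).toNat = b + 1 := by omega
  rw [h2, List.length_drop]
  omega

-- ===== PRECONDITION & SPEC =====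
def Spec_listOfEntries (someList : List String) (out : List (List String)) : Prop := out = listOfEntries_alt someList
instance (someList : List String) (out : List (List String)) : Decidable (Spec_listOfEntries someList out) := by unfold Spec_listOfEntries; infer_instance

-- ===== CLAIM (what is proved, stated in full; the proofs are below) =====
def Claim_equal_listOfEntries : Prop := ∀ (someList : List String), Dom_listOfEntries someList → Spec_listOfEntries someList (listOfEntries someList)

-- ===== LEMMAS AND PROOFS =====

-- A's loop, as a recursion over the remaining lines with the pending entryString s
def goA (s : String) : List String → List (List String)
  | [] => []
  | x :: xs =>
      if x ≠ "" then goA (s ++ x ++ " ") xs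
      else [PySem.Str.slice s none (some (-1))] :: goA "" xs

theorem foldA_eq_goA (xs : List String) : ∀ (el : List (List String)) (s : String),
    (xs.foldl stepA (el, s)).1 = el ++ goA s xs := by
  induction xs with
  | nil => intro el s; simp [goA]
  | cons x t ih =>
    intro el s
    by_cases hx : x = "" <;> simp [stepA, goA, hx, ih]

theorem goA_no_blank (xs : List String) : ∀ (s : String), "" ∉ xs → goA s xs = [] := by
  induction xs with
  | nil => intro s _; simp [goA]
  | cons x t ih =>
    intro s h
    have hx : x ≠ "" := by intro hx; exact h (hx ▸ List.mem_cons_self ..)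
    simp [goA, hx, ih _ (fun hm => h (List.mem_cons_of_mem _ hm))]

theorem goA_split (pre : List String) : ∀ (s : String) (suf : List String), "" ∉ pre →
    goA s (pre ++ "" :: suf) =
      [PySem.Str.slice (pre.foldl (fun a x => a ++ x ++ " ") s) none (some (-1))] :: goA "" suf := by
  induction pre with
  | nil => intro s suf _; simp [goA]
  | cons x t ih =>
    intro s suf h
    have hx : x ≠ "" := by intro hx; exact h (hx ▸ List.mem_cons_self ..)
    simp only [List.cons_append, goA, if_pos hx, List.foldl_cons]
    exact ih _ _ (fun hm => h (List.mem_cons_of_mem _ hm))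

theorem foldl_cat_toList (pre : List String) : ∀ (s : String),
    (pre.foldl (fun a x => a ++ x ++ " ") s).toList
      = s.toList ++ ((pre.map String.toList).map (· ++ [' '])).flatten := by
  induction pre with
  | nil => intro s; simp
  | cons x t ih => intro s; simp [ih, List.append_assoc]

theorem dropLast_flatten_join (ls : List (List Char)) :
    ((ls.map (· ++ [' '])).flatten).dropLast = PySem.Chars.join [' '] ls := by
  induction ls with
  | nil => simp [PySem.Chars.join_nil]
  | cons c t ih =>
    cases t with
    | nil => simp [PySem.Chars.join_singleton]
    | cons d t' =>
      have hne : (((d :: t').map (· ++ [' '])).flatten) ≠ [] := by simp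
      rw [List.map_cons, List.flatten_cons, List.dropLast_append_of_ne_nil hne, ih,
        PySem.Chars.join_cons_cons, List.append_assoc]

theorem slice_foldl_eq_join (pre : List String) :
    PySem.Str.slice (pre.foldl (fun a x => a ++ x ++ " ") "") none (some (-1))
      = PySem.Str.join " " pre := by
  apply String.toList_inj.mp
  rw [PySem.Str.slice_to_neg_one, foldl_cat_toList]
  have h1 : ("" : String).toList = [] := rfl
  rw [h1, List.nil_append, dropLast_flatten_join]
  simp [PySem.Str.toList_join]

theorem alt_of_none {xs : List String} (h : PySem.List.index? xs "" = none) :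
    listOfEntries_alt xs = [] := by
  rw [listOfEntries_alt.eq_def]
  split
  · rfl
  · rename_i b heq
    rw [h] at heq
    cases heq

theorem alt_of_some {xs : List String} {b : Nat} (h : PySem.List.index? xs "" = some b) :
    listOfEntries_alt xs =
      [PySem.Str.join " " (PySem.List.slice xs none (some (b : Int)))] ::
        listOfEntries_alt (PySem.List.slice xs (some ((b : Int) + 1)) none) := by
  rw [listOfEntries_alt.eq_def]
  split
  · rename_i heq
    rw [h] at heq
    cases heq
  · rename_i b' heq
    rw [h] at heq
    injection heq with hb
    subst hb
    rfl

theorem goA_eq_alt : ∀ (n : Nat) (xs : List String), xs.length ≤ n →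
    goA "" xs = listOfEntries_alt xs := by
  intro n
  induction n with
  | zero =>
    intro xs hlen
    have hx : xs = [] := List.length_eq_zero_iff.mp (Nat.le_zero.mp hlen)
    subst hx
    rw [alt_of_none (by rw [PySem.List.index?_eq_none_iff]; exact List.not_mem_nil)]
    simp [goA]
  | succ n ih =>
    intro xs hlen
    cases h : PySem.List.index? xs "" with
    | none =>
      rw [alt_of_none h]
      exact goA_no_blank xs "" ((PySem.List.index?_eq_none_iff _ _).mp h)
    | some b =>
      obtain ⟨pre, suf, hxs, hb, hpre⟩ := (PySem.List.index?_eq_some_iff _ _ _).mp h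
      rw [alt_of_some h]
      have htake : PySem.List.slice xs none (some (b : Int)) = pre := by
        rw [PySem.List.slice_to_natCast, hxs, ← hb, List.take_left]
      have hdrop : PySem.List.slice xs (some ((b : Int) + 1)) none = suf := by
        have : ((b : Int) + 1) = ((b + 1 : Nat) : Int) := by push_cast; ring
        rw [this, PySem.List.slice_from_natCast, hxs]
        have hx2 : pre ++ "" :: suf = (pre ++ [""]) ++ suf := by simp
        have hl : b + 1 = (pre ++ [""]).length := by simp [← hb]
        rw [hx2, hl, List.drop_left]
      have hsuf : suf.length ≤ n := by
        have : xs.length = pre.length + 1 + suf.length := by simp [hxs]; omega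
        omega
      rw [htake, hdrop, hxs, goA_split pre "" suf hpre, slice_foldl_eq_join, ih suf hsuf]

-- ===== VERDICT (by name: the statement is the Claim_ definition above) =====
theorem listOfEntries_spec : Claim_equal_listOfEntries := by
  intro someList _
  unfold Spec_listOfEntries listOfEntries
  rw [foldA_eq_goA, List.nil_append]
  exact goA_eq_alt someList.length someList le_rfl
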